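-- pv_equiv track=rewrite | github.com/Protecia/NNvision | python_client/django/app1/process_camera_thread.py | get_list_diff
-- ===== SOURCE A (Python) =====
-- def get_list_diff(l_new,l_old,thresh):
--     new_copy = l_new[:]
--     old_copy = l_old[:]
--     for e_new  in  l_new:
--         flag = False
--         limit_pos = thresh
--         for e_old in l_old:
--             if e_new[0]==e_old[0] :
--                 diff_pos = (sum([abs(i-j) for i,j in zip(e_new[2],e_old[2])]))
--                 if diff_pos < thresh :
--                     flag = True
--                     if diff_pos < limit_pos:
--                         limit_pos = diff_pos
--                         to_remove = (e_new,e_old)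
--         if flag:
--             #self.logger.debug('get_list-diff remove {} '.format(to_remove))
--             new_copy.remove(to_remove[0])
--             try :
--                 old_copy.remove(to_remove[1])
--                 new_copy.remove(to_remove[0])
--             except ValueError:
--                 pass
--     return new_copy,old_copy
-- ===== SOURCE B (Python) =====
-- def get_list_diff(l_new, l_old, thresh):
--     # Match-then-count design: no list copies and no .remove replay.
--     # Phase 1: for each new detection find its closest same-label old
--     # detection (strict minimum under thresh, first on ties) using a
--     # label->old-detections index; unmatched new detections are emitted
--     # directly, matched ones record a deletion demand in a counter.
--     # Phase 2: one pass over l_old keeps each element unless its value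
--     # still has a pending demand (dropping first occurrences, which is
--     # exactly what a sequence of list.remove calls deletes).
--     old_by_label = {}
--     for e_old in l_old:
--         old_by_label.setdefault(e_old[0], []).append(e_old)
--     need = {}
--     new_res = []
--     for e_new in l_new:
--         limit_pos = thresh
--         best = None
--         for e_old in old_by_label.get(e_new[0], []):
--             diff_pos = sum(abs(i - j) for i, j in zip(e_new[2], e_old[2]))
--             if diff_pos < limit_pos:
--                 limit_pos = diff_pos
--                 best = e_old
--         if best is None:
--             new_res.append(e_new)
--         else:
--             k = (best[0], best[1], tuple(best[2]))
--             need[k] = need.get(k, 0) + 1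
--     old_res = []
--     for e_old in l_old:
--         k = (e_old[0], e_old[1], tuple(e_old[2]))
--         if need.get(k, 0) > 0:
--             need[k] = need[k] - 1
--         else:
--             old_res.append(e_old)
--     return new_res, old_res
-- ===== Notes on version B (the rewrite author's own statement) =====
-- stated objective: alternative
-- what changed: Replaces A's stateful copy-and-remove nested loops by a match-then-count design: a pure matching pass over a label-indexed view of l_old that emits unmatched new detections directly and records deletion demands in a value counter, then a single keep/drop pass over l_old consuming the counter (no list copies, no .remove replay).
-- outside the precondition, e.g. on get_list_diff([(1, 0, [0]), (1, 0, [0])], [(1, 0, [1])], 5): A raises ValueError, B returns ([], [])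
import Mathlib
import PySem

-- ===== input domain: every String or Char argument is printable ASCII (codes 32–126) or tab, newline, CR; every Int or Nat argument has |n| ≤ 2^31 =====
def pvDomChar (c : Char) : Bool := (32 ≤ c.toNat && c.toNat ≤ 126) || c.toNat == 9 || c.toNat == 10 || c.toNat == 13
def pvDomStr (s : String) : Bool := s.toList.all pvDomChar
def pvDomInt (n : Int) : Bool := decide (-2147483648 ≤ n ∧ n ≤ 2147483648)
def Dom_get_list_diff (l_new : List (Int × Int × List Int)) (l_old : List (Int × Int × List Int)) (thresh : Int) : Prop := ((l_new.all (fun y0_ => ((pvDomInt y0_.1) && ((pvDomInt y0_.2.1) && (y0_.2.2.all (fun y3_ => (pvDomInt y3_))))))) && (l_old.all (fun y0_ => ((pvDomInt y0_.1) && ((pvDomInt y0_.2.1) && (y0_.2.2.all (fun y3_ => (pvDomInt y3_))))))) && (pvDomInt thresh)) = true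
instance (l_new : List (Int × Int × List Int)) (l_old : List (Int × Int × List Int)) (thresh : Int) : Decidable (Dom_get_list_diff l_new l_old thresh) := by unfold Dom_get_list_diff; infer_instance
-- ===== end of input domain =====

-- B replaces A's stateful copy-and-remove nested loops by a match-then-count design (pure
-- matching pass over a label index, then one counter-driven keep/drop pass over l_old);
-- objective: alternative. Return values agree on Pre_; both Pythons mutate only local state.

abbrev pvE : Type := Int × Int × List Int

-- shared helper: sum(abs(i-j) for i,j in zip(xs, ys)) — appears verbatim in both Pythons
def pyL1 (xs ys : List Int) : Int :=
  ((xs.zip ys).map (fun p => |p.1 - p.2|)).sum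

-- ===== PORT A =====
-- A's removal block: new_copy.remove(a); try: old_copy.remove(b); new_copy.remove(a)
-- except ValueError: pass  (a `none` of the FIRST remove is an uncaught ValueError in
-- Python; those inputs are excluded by Pre_ below)
def applyRemoval (st : List pvE × List pvE) (a b : pvE) : List pvE × List pvE :=
  match PySem.List.remove? st.1 a with
  | none => st
  | some nc =>
    match PySem.List.remove? st.2 b with
    | none => (nc, st.2)
    | some oc =>
      match PySem.List.remove? nc a with
      | none => (nc, oc)
      | some nc2 => (nc2, oc)

def get_list_diff (l_new : List (Int × Int × List Int)) (l_old : List (Int × Int × List Int)) (thresh : Int) : (List (Int × Int × List Int)) × (List (Int × Int × List Int)) :=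
  l_new.foldl (fun st e_new =>
    let inner := l_old.foldl
      (fun (acc : Bool × Int × Option (pvE × pvE)) e_old =>
        if e_new.1 == e_old.1 then
          let diff_pos := pyL1 e_new.2.2 e_old.2.2
          if diff_pos < thresh then
            if diff_pos < acc.2.1 then (true, diff_pos, some (e_new, e_old))
            else (true, acc.2.1, acc.2.2)
          else acc
        else acc)
      (false, thresh, none)
    if inner.1 then
      match inner.2.2 with
      | some pr => applyRemoval st pr.1 pr.2
      | none => st
    else st) (l_new, l_old)

-- ===== PORT B =====
-- old_by_label.setdefault(e[0], []).append(e) over l_old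
def pvBuckets (l_old : List pvE) : PySem.Dict Int (List pvE) :=
  l_old.foldl (fun d e => d.insert e.1 (d.getD e.1 [] ++ [e])) PySem.Dict.empty

-- strict-minimum scan of one bucket, first-encountered kept on ties
def pvBestMatch (buckets : PySem.Dict Int (List pvE)) (e_new : pvE) (thresh : Int) :
    Option pvE :=
  ((buckets.getD e_new.1 []).foldl
    (fun (acc : Int × Option pvE) e_old =>
      if pyL1 e_new.2.2 e_old.2.2 < acc.1 then (pyL1 e_new.2.2 e_old.2.2, some e_old) else acc)
    (thresh, none)).2

def get_list_diff_alt (l_new : List (Int × Int × List Int)) (l_old : List (Int × Int × List Int)) (thresh : Int) : (List (Int × Int × List Int)) × (List (Int × Int × List Int)) :=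
  let buckets := pvBuckets l_old
  -- phase 1: need-counter of matched old values + list of unmatched new detections
  let phase1 := l_new.foldl
    (fun (acc : PySem.Dict pvE Int × List pvE) e_new =>
      match pvBestMatch buckets e_new thresh with
      | none => (acc.1, acc.2 ++ [e_new])
      | some b => (acc.1.insert b (acc.1.getD b 0 + 1), acc.2)) (PySem.Dict.empty, [])
  -- phase 2: keep each old element unless a deletion demand for its value remains
  let phase2 := l_old.foldl
    (fun (acc : PySem.Dict pvE Int × List pvE) e_old =>
      if acc.1.getD e_old 0 > 0 then (acc.1.insert e_old (acc.1.getD e_old 0 - 1), acc.2)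
      else (acc.1, acc.2 ++ [e_old])) (phase1.1, [])
  (phase1.2, phase2.2)

-- ===== PRECONDITION & SPEC =====
-- Pre_ excludes inputs where a detection value occurs more than once in l_new AND has a
-- same-label old detection within thresh: there A's double-removal scheme can raise an
-- uncaught ValueError (on the remaining such inputs A happens to return, and B agrees there
-- too, but the claim covers only Pre_).
def Pre_get_list_diff (l_new : List (Int × Int × List Int)) (l_old : List (Int × Int × List Int)) (thresh : Int) : Prop :=
  ∀ e ∈ l_new, 1 < l_new.count e →
    ∀ o ∈ l_old, ¬(o.1 = e.1 ∧ ((e.2.2.zip o.2.2).map (fun p => |p.1 - p.2|)).sum < thresh)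
instance (l_new : List (Int × Int × List Int)) (l_old : List (Int × Int × List Int)) (thresh : Int) : Decidable (Pre_get_list_diff l_new l_old thresh) := by unfold Pre_get_list_diff; infer_instance
def pvWitness_get_list_diff : (List (Int × Int × List Int)) × (List (Int × Int × List Int)) × Int :=
  ([(1, 0, [0]), (2, 0, [7])], [(1, 0, [1]), (1, 0, [4])], 5)

def Spec_get_list_diff (l_new : List (Int × Int × List Int)) (l_old : List (Int × Int × List Int)) (thresh : Int) (out : (List (Int × Int × List Int)) × (List (Int × Int × List Int))) : Prop := out = get_list_diff_alt l_new l_old thresh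
instance (l_new : List (Int × Int × List Int)) (l_old : List (Int × Int × List Int)) (thresh : Int) (out : (List (Int × Int × List Int)) × (List (Int × Int × List Int))) : Decidable (Spec_get_list_diff l_new l_old thresh out) := by unfold Spec_get_list_diff; infer_instance

-- ===== CLAIM (what is proved, stated in full; the proofs are below) =====
def Claim_equal_get_list_diff : Prop := ∀ (l_new : List (Int × Int × List Int)) (l_old : List (Int × Int × List Int)) (thresh : Int), Dom_get_list_diff l_new l_old thresh → Pre_get_list_diff l_new l_old thresh → Spec_get_list_diff l_new l_old thresh (get_list_diff l_new l_old thresh)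

-- ===== LEMMAS AND PROOFS =====

theorem bucket_foldl (l : List pvE) (k : Int) :
    ∀ d : PySem.Dict Int (List pvE),
      (l.foldl (fun d e => d.insert e.1 (d.getD e.1 [] ++ [e])) d).getD k []
        = d.getD k [] ++ l.filter (fun e => e.1 == k) := by
  induction l with
  | nil => intro d; simp [List.foldl]
  | cons x l ih =>
    intro d
    simp only [List.foldl_cons, List.filter_cons, ih]
    rw [PySem.Dict.getD_insert]
    by_cases h : x.1 = k
    · simp [h]
    · simp [h, Ne.symm h]

theorem buckets_getD (l_old : List pvE) (k : Int) :
    (pvBuckets l_old).getD k [] = l_old.filter (fun e => e.1 == k) := by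
  unfold pvBuckets
  rw [bucket_foldl]
  simp [PySem.Dict.getD_empty]

-- A's inner loop over l_old equals B's strict-minimum scan of the label bucket
theorem inner_eq (e : pvE) (thresh : Int) :
    ∀ (l : List pvE) (lim : Int) (bo : Option pvE),
      lim ≤ thresh → (bo = none → lim = thresh) →
      l.foldl
        (fun (acc : Bool × Int × Option (pvE × pvE)) e_old =>
          if e.1 == e_old.1 then
            let diff_pos := pyL1 e.2.2 e_old.2.2
            if diff_pos < thresh then
              if diff_pos < acc.2.1 then (true, diff_pos, some (e, e_old))
              else (true, acc.2.1, acc.2.2)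
            else acc
          else acc)
        (bo.isSome, lim, bo.map (fun b => (e, b)))
      = (let r := (l.filter (fun x => x.1 == e.1)).foldl
            (fun (acc : Int × Option pvE) e_old =>
              if pyL1 e.2.2 e_old.2.2 < acc.1 then (pyL1 e.2.2 e_old.2.2, some e_old) else acc)
            (lim, bo)
         (r.2.isSome, r.1, r.2.map (fun b => (e, b)))) := by
  intro l
  induction l with
  | nil => intro lim bo _ _; simp
  | cons x l ih =>
    intro lim bo h1 h2
    simp only [List.foldl_cons, List.filter_cons]
    by_cases hx : x.1 = e.1
    · by_cases hdl : pyL1 e.2.2 x.2.2 < lim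
      · have hdt : pyL1 e.2.2 x.2.2 < thresh := lt_of_lt_of_le hdl h1
        have := ih (pyL1 e.2.2 x.2.2) (some x) (le_of_lt hdt) (by simp)
        simpa [hx, hdl, hdt] using this
      · by_cases hdt : pyL1 e.2.2 x.2.2 < thresh
        · have hbo : bo.isSome = true := by
            cases bo with
            | none => exact absurd (h2 rfl ▸ hdt) hdl
            | some b => rfl
          have := ih lim bo h1 h2
          simpa [hx, hdl, hdt, hbo] using this
        · have := ih lim bo h1 h2
          simpa [hx, hdl, hdt] using this
    · have := ih lim bo h1 h2
      have hx' : (e.1 == x.1) = false := by simpa using Ne.symm hx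
      have hx'' : (x.1 == e.1) = false := by simpa using hx
      simpa [hx', hx''] using this

-- the min-scan only ever reports a bucket member within the initial limit
theorem scan_some (e : pvE) :
    ∀ (l : List pvE) (lim : Int) (bo : Option pvE) (b : pvE),
      (l.foldl (fun (acc : Int × Option pvE) e_old =>
          if pyL1 e.2.2 e_old.2.2 < acc.1 then (pyL1 e.2.2 e_old.2.2, some e_old) else acc)
        (lim, bo)).2 = some b →
      bo = some b ∨ (b ∈ l ∧ pyL1 e.2.2 b.2.2 < lim) := by
  intro l
  induction l with
  | nil => intro lim bo b h; exact Or.inl h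
  | cons x l ih =>
    intro lim bo b h
    simp only [List.foldl_cons] at h
    by_cases hx : pyL1 e.2.2 x.2.2 < lim
    · rw [if_pos hx] at h
      rcases ih _ _ _ h with h' | ⟨hm, hlt⟩
      · cases Option.some.inj h'
        exact Or.inr ⟨List.mem_cons_self, hx⟩
      · exact Or.inr ⟨List.mem_cons_of_mem _ hm, lt_of_lt_of_le hlt (le_of_lt hx)⟩
    · rw [if_neg hx] at h
      rcases ih _ _ _ h with h' | ⟨hm, hlt⟩
      · exact Or.inl h'
      · exact Or.inr ⟨List.mem_cons_of_mem _ hm, hlt⟩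

theorem best_mem (l_old : List pvE) (e b : pvE) (thresh : Int)
    (h : pvBestMatch (pvBuckets l_old) e thresh = some b) :
    b ∈ l_old ∧ b.1 = e.1 ∧ pyL1 e.2.2 b.2.2 < thresh := by
  unfold pvBestMatch at h
  rw [buckets_getD] at h
  rcases scan_some e _ thresh none b h with h' | ⟨hm, hlt⟩
  · exact absurd h' (by simp)
  · rw [List.mem_filter] at hm
    exact ⟨hm.1, by simpa using hm.2, hlt⟩

-- under Pre_, a matched new detection is unique in l_new
theorem matched_unique (l_new l_old : List pvE) (thresh : Int)
    (hpre : Pre_get_list_diff l_new l_old thresh) (e : pvE) (he : e ∈ l_new)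
    (hm : (pvBestMatch (pvBuckets l_old) e thresh).isSome = true) :
    l_new.count e ≤ 1 := by
  by_contra h
  obtain ⟨b, hb⟩ := Option.isSome_iff_exists.mp hm
  obtain ⟨hbo, hlbl, hlt⟩ := best_mem l_old e b thresh hb
  exact hpre e he (by omega) b hbo ⟨hlbl, by simpa [pyL1] using hlt⟩

-- erasing an element occurring at most once is filtering it out
theorem erase_of_count_le_one (e : pvE) :
    ∀ l : List pvE, l.count e ≤ 1 → l.erase e = l.filter (fun x => x ≠ e) := by
  intro l
  induction l with
  | nil => intro _; simp
  | cons x l ih =>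
    intro h
    by_cases hx : x = e
    · subst hx
      rw [List.count_cons_self] at h
      rw [List.erase_cons_head, List.filter_cons_of_neg (by simp)]
      symm
      apply List.filter_eq_self.mpr
      intro a ha
      have hax : a ≠ x := fun hax =>
        absurd (List.count_pos_iff.mpr (hax ▸ ha)) (by omega)
      simp [hax]
    · have h' : l.count e ≤ 1 := le_trans List.count_le_count_cons h
      rw [List.erase_cons_tail (by simpa using hx), List.filter_cons_of_pos (by simpa using hx), ih h']

-- counter-driven keep/drop, functional form
def pvCF (c : pvE → Int) : List pvE → List pvE
  | [] => []
  | o :: l => if c o > 0 then pvCF (fun v => if v = o then c o - 1 else c v) l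
              else o :: pvCF c l

-- phase 2 of B computes pvCF of the need counter
theorem phase2_eq :
    ∀ (l : List pvE) (d : PySem.Dict pvE Int) (res : List pvE),
      (l.foldl (fun (acc : PySem.Dict pvE Int × List pvE) o =>
          if acc.1.getD o 0 > 0 then (acc.1.insert o (acc.1.getD o 0 - 1), acc.2)
          else (acc.1, acc.2 ++ [o])) (d, res)).2
        = res ++ pvCF (fun v => d.getD v 0) l := by
  intro l
  induction l with
  | nil => intro d res; simp [pvCF]
  | cons o l ih =>
    intro d res
    simp only [List.foldl_cons, pvCF]
    by_cases h : d.getD o 0 > 0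
    · rw [if_pos h, if_pos h, ih]
      congr 1
      congr 1
      funext v
      rw [PySem.Dict.getD_insert]
    · rw [if_neg h, if_neg h, ih]
      simp

-- phase 1 of B splits into the need counter over matches and the unmatched filter
theorem phase1_eq (g : pvE → Option pvE) :
    ∀ (l : List pvE) (d : PySem.Dict pvE Int) (res : List pvE),
      l.foldl (fun (acc : PySem.Dict pvE Int × List pvE) e =>
          match g e with
          | none => (acc.1, acc.2 ++ [e])
          | some b => (acc.1.insert b (acc.1.getD b 0 + 1), acc.2)) (d, res)
        = ((l.filterMap g).foldl (fun d b => d.insert b (d.getD b 0 + 1)) d,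
           res ++ l.filter (fun e => (g e).isNone)) := by
  intro l
  induction l with
  | nil => intro d res; simp
  | cons e l ih =>
    intro d res
    simp only [List.foldl_cons, List.filterMap_cons, List.filter_cons]
    cases hg : g e with
    | none => simpa [hg] using ih d (res ++ [e])
    | some b => simpa [hg] using ih (d.insert b (d.getD b 0 + 1)) res

-- the need counter counts occurrences among the matches
theorem needOf_getD (v : pvE) :
    ∀ (bs : List pvE) (d : PySem.Dict pvE Int),
      (bs.foldl (fun d b => d.insert b (d.getD b 0 + 1)) d).getD v 0
        = d.getD v 0 + (bs.count v : Int) := by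
  intro bs
  induction bs with
  | nil => intro d; simp
  | cons b bs ih =>
    intro d
    simp only [List.foldl_cons, ih, List.count_cons]
    rw [PySem.Dict.getD_insert]
    by_cases h : v = b
    · simp [h]
      omega
    · have h' : ¬b = v := fun hh => h hh.symm
      simp [h, h']

-- bumping one demand = first erasing one occurrence (the heart of count-vs-replay)
theorem pvCF_update (b : pvE) :
    ∀ (l : List pvE) (c c' : pvE → Int), (∀ v, 0 ≤ c v) →
      c' b = c b + 1 → (∀ v, v ≠ b → c' v = c v) →
      pvCF c' l = pvCF c ((PySem.List.remove? l b).getD l) := by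
  intro l
  induction l with
  | nil => intro c c' _ _ _; simp [PySem.List.remove?, pvCF]
  | cons o l ih =>
    intro c c' hc hb hne
    by_cases ho : o = b
    · subst ho
      rw [PySem.List.remove?_cons_self]
      simp only [Option.getD_some, pvCF]
      rw [if_pos (by rw [hb]; have := hc o; omega)]
      have hfun : (fun v => if v = o then c' o - 1 else c' v) = c := by
        funext v
        by_cases hv : v = o
        · subst hv; simp [hb]
        · simp [hv, hne v hv]
      rw [hfun]
    · rw [PySem.List.remove?_cons_of_ne l ho]
      have hco : c' o = c o := hne o ho
      by_cases hcop : c o > 0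
      · have ihx := ih (fun v => if v = o then c o - 1 else c v)
          (fun v => if v = o then c o - 1 else c' v)
          (by intro v; by_cases hv : v = o
              · simp [hv]; omega
              · simp [hv]; exact hc v)
          (by have hbo : ¬(b = o) := fun h => ho h.symm
              simp only [if_neg hbo, hb])
          (by intro v hv; by_cases hv' : v = o
              · subst hv'
                show (if v = v then c v - 1 else c' v) = (if v = v then c v - 1 else c v)
                rw [if_pos rfl, if_pos rfl]
              · simp only [if_neg hv', hne v hv])
        cases hr : PySem.List.remove? l b with
        | none =>
          rw [hr] at ihx
          simp only [Option.map_none, Option.getD_none] at ihx ⊢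
          simp only [pvCF]
          rw [if_pos (by rw [hco]; exact hcop), if_pos hcop, hco, ihx]
        | some l' =>
          rw [hr] at ihx
          simp only [Option.map_some, Option.getD_some] at ihx ⊢
          simp only [pvCF]
          rw [if_pos (by rw [hco]; exact hcop), if_pos hcop, hco, ihx]
      · have ihx := ih c c' hc hb hne
        cases hr : PySem.List.remove? l b with
        | none =>
          rw [hr] at ihx
          simp only [Option.map_none, Option.getD_none] at ihx ⊢
          simp only [pvCF]
          rw [if_neg (by rw [hco]; exact hcop), if_neg hcop, ihx]
        | some l' =>
          rw [hr] at ihx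
          simp only [Option.map_some, Option.getD_some] at ihx ⊢
          simp only [pvCF]
          rw [if_neg (by rw [hco]; exact hcop), if_neg hcop, ihx]

-- sequential list.remove replay = counter-driven keep/drop
theorem removeSeq_eq_cf :
    ∀ (bs : List pvE) (l : List pvE),
      bs.foldl (fun o b => (PySem.List.remove? o b).getD o) l
        = pvCF (fun v => (bs.count v : Int)) l := by
  intro bs
  induction bs with
  | nil =>
    intro l
    simp only [List.foldl_nil]
    induction l with
    | nil => simp [pvCF]
    | cons o l ih =>
      simp only [pvCF, List.count_nil, Nat.cast_zero]
      rw [if_neg (lt_irrefl 0)]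
      exact congrArg (o :: ·) ih
  | cons b bs ih =>
    intro l
    simp only [List.foldl_cons]
    rw [ih]
    rw [pvCF_update b l (fun v => (bs.count v : Int)) (fun v : pvE => ((b :: bs).count v : Int))
      (fun v => Int.natCast_nonneg _)
      (by simp only [List.count_cons_self]; push_cast; ring)
      (by intro v hv; simp only [List.count_cons_of_ne (fun hh => hv hh.symm)])]

-- characterisation of A's main loop under uniqueness of matched new detections
theorem A_char (g : pvE → Option pvE) (L : List pvE)
    (huniq : ∀ e ∈ L, (g e).isSome = true → L.count e ≤ 1) :
    ∀ (l pref : List pvE) (oc : List pvE), L = pref ++ l →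
      l.foldl (fun st e =>
          match g e with
          | some b => applyRemoval st e b
          | none => st)
        (L.filter (fun x => !((g x).isSome && decide (x ∈ pref))), oc)
      = (L.filter (fun x => !(g x).isSome),
         (l.filterMap g).foldl (fun o b => (PySem.List.remove? o b).getD o) oc) := by
  intro l
  induction l with
  | nil =>
    intro pref oc hL
    simp only [List.foldl_nil, List.filterMap_nil]
    congr 1
    apply List.filter_congr
    intro x hx
    have : (g x).isSome = true → x ∈ pref := by
      intro _; rw [hL] at hx; simpa using hx
    by_cases hgx : (g x).isSome = true
    · simp [hgx, this hgx]
    · simp [hgx]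
  | cons e l ih =>
    intro pref oc hL
    have heL : e ∈ L := by rw [hL]; simp
    simp only [List.foldl_cons, List.filterMap_cons]
    cases hg : g e with
    | none =>
      have hfil : L.filter (fun x => !((g x).isSome && decide (x ∈ pref)))
          = L.filter (fun x => !((g x).isSome && decide (x ∈ pref ++ [e]))) := by
        apply List.filter_congr
        intro x _
        by_cases hgx : (g x).isSome = true
        · have hxe : x ∈ pref ++ [e] ↔ x ∈ pref := by
            simp only [List.mem_append, List.mem_singleton]
            constructor
            · rintro (h | rfl)
              · exact h
              · rw [hg] at hgx; simp at hgx
            · exact Or.inl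
          simp [hgx, hxe]
        · simp [hgx]
      rw [hfil, ih (pref ++ [e]) oc (by rw [hL, List.append_assoc]; rfl)]
    | some b =>
      have hgsome : (g e).isSome = true := by rw [hg]; rfl
      have hcount : L.count e ≤ 1 := huniq e heL hgsome
      have hnotpref : e ∉ pref := by
        intro hp
        have h1 : 1 ≤ pref.count e := List.count_pos_iff.mpr hp
        have h2 : 1 ≤ (e :: l).count e := List.count_pos_iff.mpr (by simp)
        rw [hL, List.count_append] at hcount
        omega
      set nc := L.filter (fun x => !((g x).isSome && decide (x ∈ pref))) with hnc
      have hemem : e ∈ nc := by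
        rw [hnc]
        apply List.mem_filter.mpr
        exact ⟨heL, by simp [hnotpref]⟩
      have hnccount : nc.count e ≤ 1 :=
        le_trans (List.filter_sublist.count_le e) hcount
      have hrem1 : PySem.List.remove? nc e = some (nc.erase e) :=
        PySem.List.remove?_eq_some_erase nc e hemem
      have herase : nc.erase e
          = L.filter (fun x => !((g x).isSome && decide (x ∈ pref ++ [e]))) := by
        rw [erase_of_count_le_one e nc hnccount, hnc, List.filter_filter]
        apply List.filter_congr
        intro x _
        by_cases hgx : (g x).isSome = true
        · by_cases hxe : x = e
          · subst hxe; simp [hgx]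
          · have : x ∈ pref ++ [e] ↔ x ∈ pref := by
              simp only [List.mem_append, List.mem_singleton]
              exact ⟨fun h => h.resolve_right (fun h' => hxe h'), Or.inl⟩
            simp [hgx, hxe, this]
        · by_cases hxe : x = e
          · subst hxe; rw [hg] at hgx; simp at hgx
          · simp [hgx, hxe]
      have hrem2 : PySem.List.remove? (nc.erase e) e = none := by
        apply (PySem.List.remove?_eq_none_iff _ _).mpr
        have := List.count_erase_self (a := e) (l := nc)
        intro hmem
        have h1 : 1 ≤ (nc.erase e).count e := List.count_pos_iff.mpr hmem
        omega
      have happly : ∀ oc', applyRemoval (nc, oc') e b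
          = (nc.erase e, (PySem.List.remove? oc' b).getD oc') := by
        intro oc'
        unfold applyRemoval
        rw [hrem1]
        cases hro : PySem.List.remove? oc' b with
        | none => simp
        | some oc2 => simp [hrem2]
      dsimp only
      rw [happly oc, herase,
        ih (pref ++ [e]) ((PySem.List.remove? oc b).getD oc)
          (by rw [hL, List.append_assoc]; rfl)]
      rfl

-- ===== VERDICT (by name: the statement is the Claim_ definition above) =====
theorem get_list_diff_spec : Claim_equal_get_list_diff := by
  intro l_new l_old thresh _ hpre
  unfold Spec_get_list_diff get_list_diff get_list_diff_alt
  dsimp only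
  set g : pvE → Option pvE := fun e => pvBestMatch (pvBuckets l_old) e thresh with hgdef
  -- A's per-element inner loop is g
  have hstep : ∀ (st : List pvE × List pvE) (e : pvE),
      (let inner := l_old.foldl
          (fun (acc : Bool × Int × Option (pvE × pvE)) e_old =>
            if e.1 == e_old.1 then
              let diff_pos := pyL1 e.2.2 e_old.2.2
              if diff_pos < thresh then
                if diff_pos < acc.2.1 then (true, diff_pos, some (e, e_old))
                else (true, acc.2.1, acc.2.2)
              else acc
            else acc)
          (false, thresh, none)
       if inner.1 then
         match inner.2.2 with
         | some pr => applyRemoval st pr.1 pr.2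
         | none => st
       else st)
      = (match g e with
         | some b => applyRemoval st e b
         | none => st) := by
    intro st e
    have h := inner_eq e thresh l_old thresh none le_rfl (fun _ => rfl)
    simp only [Option.isSome_none, Option.map_none] at h
    rw [h]
    have hgb : g e = pvBestMatch (pvBuckets l_old) e thresh := rfl
    unfold pvBestMatch at hgb
    rw [buckets_getD] at hgb
    cases hr : (List.foldl (fun (acc : Int × Option pvE) e_old =>
        if pyL1 e.2.2 e_old.2.2 < acc.1 then (pyL1 e.2.2 e_old.2.2, some e_old) else acc)
        (thresh, none) (List.filter (fun x => x.1 == e.1) l_old)).2 with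
    | none => rw [hgb, hr]; simp
    | some b => rw [hgb, hr]; simp
  have hAfold : l_new.foldl (fun st e_new =>
      let inner := l_old.foldl
        (fun (acc : Bool × Int × Option (pvE × pvE)) e_old =>
          if e_new.1 == e_old.1 then
            let diff_pos := pyL1 e_new.2.2 e_old.2.2
            if diff_pos < thresh then
              if diff_pos < acc.2.1 then (true, diff_pos, some (e_new, e_old))
              else (true, acc.2.1, acc.2.2)
            else acc
          else acc)
        (false, thresh, none)
      if inner.1 then
        match inner.2.2 with
        | some pr => applyRemoval st pr.1 pr.2
        | none => st
      else st) (l_new, l_old)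
    = l_new.foldl (fun st e =>
        match g e with
        | some b => applyRemoval st e b
        | none => st) (l_new, l_old) := by
    have hfeq : (fun (st : List pvE × List pvE) (e : pvE) =>
        match g e with
        | some b => applyRemoval st e b
        | none => st)
      = (fun st e_new =>
        let inner := l_old.foldl
          (fun (acc : Bool × Int × Option (pvE × pvE)) e_old =>
            if e_new.1 == e_old.1 then
              let diff_pos := pyL1 e_new.2.2 e_old.2.2
              if diff_pos < thresh then
                if diff_pos < acc.2.1 then (true, diff_pos, some (e_new, e_old))
                else (true, acc.2.1, acc.2.2)
              else acc
            else acc)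
          (false, thresh, none)
        if inner.1 then
          match inner.2.2 with
          | some pr => applyRemoval st pr.1 pr.2
          | none => st
        else st) := by
      funext st e
      exact (hstep st e).symm
    rw [← hfeq]
  rw [hAfold]
  -- characterise A
  have huniq : ∀ e ∈ l_new, (g e).isSome = true → l_new.count e ≤ 1 := by
    intro e he hm
    exact matched_unique l_new l_old thresh hpre e he hm
  have hstart : l_new.filter (fun x => !((g x).isSome && decide (x ∈ ([] : List pvE))))
      = l_new := by
    apply List.filter_eq_self.mpr
    intro x _
    simp
  have hA := A_char g l_new huniq l_new [] l_old rfl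
  rw [hstart] at hA
  rw [hA]
  -- characterise B
  rw [phase1_eq g l_new PySem.Dict.empty []]
  simp only [List.nil_append]
  rw [phase2_eq]
  have hcnt : (fun v => ((l_new.filterMap g).foldl
        (fun d b => d.insert b (d.getD b 0 + 1)) PySem.Dict.empty).getD v 0)
      = (fun v => (((l_new.filterMap g).count v : Nat) : Int)) := by
    funext v
    rw [needOf_getD v (l_new.filterMap g) PySem.Dict.empty, PySem.Dict.getD_empty]
    simp
  rw [hcnt, ← removeSeq_eq_cf]
  -- the unmatched filter matches
  congr 1
  · apply List.filter_congr
    intro x _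
    cases g x with
    | none => rfl
    | some b => rfl
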